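-- pv_equiv track=rewrite | github.com/hasssanezzz/PyMicroHTTP | pymicrohttp/server.py | __match_path
-- ===== SOURCE A (Python) =====
-- def __match_path(pattern: str, path: str) -> dict | None:
--     results = {}
--     pattern_chunks, path_chunks = pattern.split('/'), path.split('/')
--     if len(pattern_chunks) != len(path_chunks):
--         return None
--
--     for pattern_chunk, path_chunk in zip(pattern_chunks, path_chunks):
--         if pattern_chunk.startswith(':'):
--             param = pattern_chunk[1:]
--             results[param] = path_chunk
--         elif pattern_chunk != path_chunk:
--             return None
--
--     return results
-- ===== SOURCE B (Python) =====
-- def __match_path(pattern: str, path: str) -> dict | None: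
--     def go(pcs, xcs):
--         if not pcs and not xcs:
--             return []
--         if not pcs or not xcs:
--             return None
--         c, x = pcs[0], xcs[0]
--         rest = go(pcs[1:], xcs[1:])
--         if rest is None:
--             return None
--         if c.startswith(':'):
--             return [(c[1:], x)] + rest
--         return rest if c == x else None
--
--     pairs = go(pattern.split('/'), path.split('/'))
--     return None if pairs is None else dict(pairs)
-- ===== Notes on version B (the rewrite author's own statement) =====
-- stated objective: alternative
-- what changed: Replaces the length check + zip loop mutating a dict with a structural recursion over the two chunk lists that handles unequal lengths inline and returns the parameter pairs as a list, turned into a dict once at the end.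
import Mathlib
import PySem

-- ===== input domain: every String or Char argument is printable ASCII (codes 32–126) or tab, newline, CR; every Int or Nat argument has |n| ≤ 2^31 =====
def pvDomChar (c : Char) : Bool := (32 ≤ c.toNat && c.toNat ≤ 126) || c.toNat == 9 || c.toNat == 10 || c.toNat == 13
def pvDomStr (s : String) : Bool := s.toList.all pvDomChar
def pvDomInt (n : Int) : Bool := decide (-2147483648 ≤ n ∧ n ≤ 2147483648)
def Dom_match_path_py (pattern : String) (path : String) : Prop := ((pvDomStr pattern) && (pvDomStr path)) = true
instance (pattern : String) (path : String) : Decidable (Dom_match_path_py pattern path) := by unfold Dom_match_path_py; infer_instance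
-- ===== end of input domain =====

-- B replaces A's length-check + zip loop over a mutable dict by a structural
-- recursion on the two chunk lists collecting the param pairs, made a dict once at the end.
-- ===== PORT A =====
-- the for-loop over zip(pattern_chunks, path_chunks) with early return, state = results dict
def matchLoopA : List (String × String) → PySem.Dict String String → Option (PySem.Dict String String)
  | [], results => some results
  | (pc, xc) :: rest, results =>
    if PySem.Str.startswith pc ":" then
      matchLoopA rest (results.insert (PySem.Str.slice pc (some 1) none) xc)
    else if pc ≠ xc then none
    else matchLoopA rest results

def match_path_py (pattern : String) (path : String) : Option (List (String × String)) :=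
  let pattern_chunks := (PySem.Str.split? pattern "/").getD []   -- sep "/" ≠ "": split? is some
  let path_chunks := (PySem.Str.split? path "/").getD []
  if pattern_chunks.length ≠ path_chunks.length then none
  else (matchLoopA (pattern_chunks.zip path_chunks) PySem.Dict.empty).map PySem.Dict.items

-- ===== PORT B =====
-- the recursion go(pcs, xcs): pairs of params in order, none on mismatch/unequal length
def goB : List String → List String → Option (List (String × String))
  | [], [] => some []
  | [], _ :: _ => none
  | _ :: _, [] => none
  | c :: cs, x :: xs =>
    match goB cs xs with
    | none => none
    | some rest =>
      if PySem.Str.startswith c ":" then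
        some ((PySem.Str.slice c (some 1) none, x) :: rest)
      else if c = x then some rest
      else none

def match_path_py_alt (pattern : String) (path : String) : Option (List (String × String)) :=
  (goB ((PySem.Str.split? pattern "/").getD []) ((PySem.Str.split? path "/").getD [])).map
    (fun pairs => (PySem.Dict.ofList pairs).items)   -- dict(pairs)
-- ===== PRECONDITION & SPEC =====
def Spec_match_path_py (pattern : String) (path : String) (out : Option (List (String × String))) : Prop := out = match_path_py_alt pattern path
instance (pattern : String) (path : String) (out : Option (List (String × String))) : Decidable (Spec_match_path_py pattern path out) := by unfold Spec_match_path_py; infer_instance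

-- ===== CLAIM (what is proved, stated in full; the proofs are below) =====
def Claim_equal_match_path_py : Prop := ∀ (pattern : String) (path : String), Dom_match_path_py pattern path → Spec_match_path_py pattern path (match_path_py pattern path)

-- ===== LEMMAS AND PROOFS =====
-- goB (by name: the statement is the Claim_ definition above) =====
-- goB yields none whenever the chunk lists have different lengths
lemma goB_none_of_length_ne (cs xs : List String) (h : cs.length ≠ xs.length) :
    goB cs xs = none := by
  induction cs generalizing xs with
  | nil => cases xs with
    | nil => simp at h
    | cons x xs => simp [goB]
  | cons c cs ih =>
    cases xs with
    | nil => simp [goB]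
    | cons x xs =>
      have : cs.length ≠ xs.length := by simpa using h
      simp [goB, ih xs this]

-- the core invariant: A's loop over the zipped chunks, started from any dict d,
-- equals B's recursion followed by folding the collected pairs into d
lemma matchLoopA_eq_goB (cs xs : List String) (d : PySem.Dict String String)
    (h : cs.length = xs.length) :
    matchLoopA (cs.zip xs) d
      = (goB cs xs).map (fun pairs => pairs.foldl (fun d p => d.insert p.1 p.2) d) := by
  induction cs generalizing xs d with
  | nil =>
    cases xs with
    | nil => simp [matchLoopA, goB]
    | cons x xs => simp at h
  | cons c cs ih =>
    cases xs with
    | nil => simp at h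
    | cons x xs =>
      have h' : cs.length = xs.length := by simpa using h
      by_cases hs : PySem.Str.startswith c ":"
      · simp only [List.zip_cons_cons, matchLoopA, hs, if_true, goB]
        rw [ih xs _ h']
        cases goB cs xs <;> simp
      · by_cases he : c = x
        · subst he
          simp only [List.zip_cons_cons, matchLoopA, hs, goB]
          rw [if_neg (by simp), ih xs d h']
          cases goB cs xs <;> simp
        · simp only [List.zip_cons_cons, matchLoopA, hs, goB]
          rw [if_pos he]
          cases goB cs xs <;> simp [he]

-- ===== VERDICT (by name: the statement is the Claim_ definition above) =====
theorem match_path_py_spec : Claim_equal_match_path_py := by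
  intro pattern path _
  unfold Spec_match_path_py match_path_py match_path_py_alt
  set cs := (PySem.Str.split? pattern "/").getD [] with hcs
  set xs := (PySem.Str.split? path "/").getD [] with hxs
  by_cases h : cs.length = xs.length
  · simp only [h, ne_eq, not_true_eq_false, if_false, matchLoopA_eq_goB cs xs _ h]
    cases goB cs xs <;> rfl
  · simp [h, goB_none_of_length_ne cs xs h]
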